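-- pv_equiv track=rewrite | github.com/plettj/poker-tracker | plo4_wins_by_hand.py | suit_tag
-- ===== SOURCE A (Python) =====
-- from collections import Counter
--
-- def suit_tag(cards):
--     suits = [c[1].lower() for c in cards]
--     counts = sorted(Counter(suits).values(), reverse=True)
--     if counts == [4]:
--         return "m"  # Mono-suited
--     if counts == [3, 1]:
--         return "t"  # Tri-suited
--     if counts == [2, 2]:
--         return "d"  # Double-suited (pure)
--     if counts == [2, 1, 1]:
--         return "s"  # Single-suited
--     return "r"  # Rainbow
-- ===== SOURCE B (Python) =====
-- def suit_tag(cards):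
--     suits = [c[1].lower() for c in cards]
--     if len(suits) != 4:
--         return "r"  # every non-rainbow pattern accounts for exactly 4 cards
--     pairs = sum(1 for i in range(4) for j in range(i + 1, 4) if suits[i] == suits[j])
--     return {6: "m", 3: "t", 2: "d", 1: "s"}.get(pairs, "r")
-- ===== Notes on version B (the rewrite author's own statement) =====
-- stated objective: alternative
-- what changed: Drops the Counter and the sorted multiplicity vector entirely: after a length guard (every non-rainbow tag requires exactly 4 cards), B counts the equal unordered pairs among the four suits and maps that single number (6/3/2/1/0) to the tag, since the pair count uniquely identifies each 4-card suit partition.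
import Mathlib
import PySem

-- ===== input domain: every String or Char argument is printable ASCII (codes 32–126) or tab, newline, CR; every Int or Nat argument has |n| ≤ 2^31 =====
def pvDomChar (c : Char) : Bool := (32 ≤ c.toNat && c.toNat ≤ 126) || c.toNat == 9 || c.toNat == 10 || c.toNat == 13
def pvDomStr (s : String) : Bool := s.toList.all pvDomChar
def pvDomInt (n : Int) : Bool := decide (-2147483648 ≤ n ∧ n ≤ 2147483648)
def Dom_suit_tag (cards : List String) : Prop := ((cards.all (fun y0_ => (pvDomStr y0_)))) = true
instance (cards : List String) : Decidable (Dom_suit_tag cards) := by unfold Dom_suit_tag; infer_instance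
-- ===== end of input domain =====

-- B replaces A's Counter + sorted multiplicity-vector pattern match by a length guard plus
-- counting the equal unordered pairs among the four suits (6/3/2/1/0 → m/t/d/s/r).

-- ===== PORT A =====
-- suits = [c[1].lower() for c in cards]; c[1] may raise IndexError (none here, excluded by Pre_)
def suit_tag (cards : List String) : String :=
  match cards.mapM (fun c => (PySem.Str.pyGet? c 1).map PySem.Chars.lowerChar) with
  | none => ""  -- IndexError: some card has fewer than 2 characters (outside Pre_suit_tag)
  | some suits =>
    let counts := PySem.List.sorted (PySem.Dict.counter suits).values (fun x : Int => x) true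
    if counts = [4] then "m"
    else if counts = [3, 1] then "t"
    else if counts = [2, 2] then "d"
    else if counts = [2, 1, 1] then "s"
    else "r"

-- ===== PORT B =====
def suit_tag_alt (cards : List String) : String :=
  match cards.mapM (fun c => (PySem.Str.pyGet? c 1).map PySem.Chars.lowerChar) with
  | none => ""  -- IndexError, as in Source B's identical comprehension (outside Pre_suit_tag)
  | some suits =>
    if suits.length ≠ 4 then "r"
    else
      -- pairs = sum(1 for i in range(4) for j in range(i+1, 4) if suits[i] == suits[j])
      -- indexing via pyGetD with an unreachable default: here suits.length = 4 and 0 ≤ i < j < 4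
      let pairs : Int := (PySem.List.pyRange 0 4 1).foldl (fun acc i =>
        (PySem.List.pyRange (i + 1) 4 1).foldl (fun acc2 j =>
          if PySem.List.pyGetD suits i ' ' = PySem.List.pyGetD suits j ' ' then acc2 + 1 else acc2)
          acc) 0
      -- {6: "m", 3: "t", 2: "d", 1: "s"}.get(pairs, "r")
      PySem.Dict.getD (⟨[(6, "m"), (3, "t"), (2, "d"), (1, "s")]⟩ : PySem.Dict Int String) pairs "r"

-- ===== PRECONDITION & SPEC =====
-- Pre_ excludes exactly the inputs where A raises IndexError: a card string shorter than 2 characters.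
def Pre_suit_tag (cards : List String) : Prop := ∀ c ∈ cards, 2 ≤ c.toList.length
instance (cards : List String) : Decidable (Pre_suit_tag cards) := by unfold Pre_suit_tag; infer_instance
def pvWitness_suit_tag : List String := ["As", "Kd", "Qh", "2c"]
def Spec_suit_tag (cards : List String) (out : String) : Prop := out = suit_tag_alt cards
instance (cards : List String) (out : String) : Decidable (Spec_suit_tag cards out) := by unfold Spec_suit_tag; infer_instance

-- ===== CLAIM (what is proved, stated in full; the proofs are below) =====
def Claim_equal_suit_tag : Prop := ∀ (cards : List String), Dom_suit_tag cards → Pre_suit_tag cards → Spec_suit_tag cards (suit_tag cards)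

-- ===== LEMMAS AND PROOFS =====

-- the multiplicities in Counter(s) sum to len(s)
lemma pv_values_sum (s : List Char) : ((PySem.Dict.counter s).values).sum = (s.length : Int) := by
  have hperm : (PySem.Set.ofList s : List Char).Perm s.dedup := by
    rw [List.perm_ext_iff_of_nodup (PySem.Set.nodup_ofList s) (List.nodup_dedup s)]
    intro a; simp [PySem.Set.mem_ofList]
  have h1 : (PySem.Dict.counter s).values
      = (PySem.Set.ofList s : List Char).map (fun k => (s.count k : Int)) := by
    simp [PySem.Dict.values, PySem.Dict.items_counter]
  rw [h1, (hperm.map _).sum_eq]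
  calc (s.dedup.map (fun k => (s.count k : Int))).sum
      = ((s.dedup.map (fun k => s.count k)).map (Nat.cast : ℕ → ℤ)).sum := by
        simp [List.map_map, Function.comp_def]
    _ = (s.length : Int) := by rw [← Nat.cast_list_sum, List.sum_map_count_dedup_eq_length]

-- both classifications, as functions of the suits list
def pv_tagA (s : List Char) : String :=
  let counts := PySem.List.sorted (PySem.Dict.counter s).values (fun x : Int => x) true
  if counts = [4] then "m"
  else if counts = [3, 1] then "t"
  else if counts = [2, 2] then "d"
  else if counts = [2, 1, 1] then "s"
  else "r"

def pv_tagB (s : List Char) : String :=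
  if s.length ≠ 4 then "r"
  else
    let pairs : Int := (PySem.List.pyRange 0 4 1).foldl (fun acc i =>
      (PySem.List.pyRange (i + 1) 4 1).foldl (fun acc2 j =>
        if PySem.List.pyGetD s i ' ' = PySem.List.pyGetD s j ' ' then acc2 + 1 else acc2)
        acc) 0
    PySem.Dict.getD (⟨[(6, "m"), (3, "t"), (2, "d"), (1, "s")]⟩ : PySem.Dict Int String) pairs "r"

-- the inner double fold on a 4-list is the sum of the six pairwise-equality indicators
lemma pv_pairs (a b c d : Char) :
    ((PySem.List.pyRange 0 4 1).foldl (fun acc i =>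
      (PySem.List.pyRange (i + 1) 4 1).foldl (fun acc2 j =>
        if PySem.List.pyGetD [a,b,c,d] i ' ' = PySem.List.pyGetD [a,b,c,d] j ' ' then acc2 + 1 else acc2)
        acc) 0 : Int)
    = (if a = b then 1 else 0) + (if a = c then 1 else 0) + (if a = d then 1 else 0)
      + (if b = c then 1 else 0) + (if b = d then 1 else 0) + (if c = d then 1 else 0) := by
  rw [show PySem.List.pyRange 0 4 1 = [0,1,2,3] from by decide]
  simp only [List.foldl,
    show PySem.List.pyRange (0+1) 4 1 = [1,2,3] from by decide,
    show PySem.List.pyRange (1+1) 4 1 = [2,3] from by decide,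
    show PySem.List.pyRange (2+1) 4 1 = [3] from by decide,
    show PySem.List.pyRange (3+1) 4 1 = [] from by decide,
    show ∀ x : Char, PySem.List.pyGetD [a,b,c,d] 0 x = a from fun _ => rfl,
    show ∀ x : Char, PySem.List.pyGetD [a,b,c,d] 1 x = b from fun _ => rfl,
    show ∀ x : Char, PySem.List.pyGetD [a,b,c,d] 2 x = c from fun _ => rfl,
    show ∀ x : Char, PySem.List.pyGetD [a,b,c,d] 3 x = d from fun _ => rfl]
  split_ifs <;> omega

-- the literal lookup table as a chain of ifs
lemma pv_dlook (p : Int) :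
    PySem.Dict.getD (⟨[(6, "m"), (3, "t"), (2, "d"), (1, "s")]⟩ : PySem.Dict Int String) p "r"
      = if p = 6 then "m" else if p = 3 then "t" else if p = 2 then "d" else if p = 1 then "s" else "r" := by
  by_cases h6 : p = 6 <;> by_cases h3 : p = 3 <;> by_cases h2 : p = 2 <;> by_cases h1 : p = 1 <;>
    simp_all [PySem.Dict.getD, PySem.Dict.get?, List.find?, @eq_comm Int,
      show ∀ q r : Int, q ≠ r → (q == r) = false from fun q r h => beq_eq_false_iff_ne.mpr h]

lemma pv_tagB_four (a b c d : Char) :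
    pv_tagB [a, b, c, d] =
      (let p : Int := (if a = b then 1 else 0) + (if a = c then 1 else 0) + (if a = d then 1 else 0)
        + (if b = c then 1 else 0) + (if b = d then 1 else 0) + (if c = d then 1 else 0)
       if p = 6 then "m" else if p = 3 then "t" else if p = 2 then "d" else if p = 1 then "s" else "r") := by
  show (if ([a,b,c,d] : List Char).length ≠ 4 then "r" else _) = _
  rw [if_neg (by simp), pv_pairs, pv_dlook]

set_option maxHeartbeats 2000000 in
lemma pv_four (a b c d : Char) : pv_tagA [a, b, c, d] = pv_tagB [a, b, c, d] := by
  rw [pv_tagB_four]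
  by_cases h1 : b = a <;> by_cases h2 : c = a <;> by_cases h3 : c = b <;>
  by_cases h4 : d = a <;> by_cases h5 : d = b <;> by_cases h6 : d = c <;>
  subst_vars <;>
  simp_all [pv_tagA, PySem.Dict.values, PySem.Dict.items_counter,
    PySem.Set.ofList, PySem.Set.add, PySem.Set.empty, List.count_cons, @eq_comm Char] <;>
  (try decide)

lemma pv_core (s : List Char) : pv_tagA s = pv_tagB s := by
  by_cases hlen : s.length = 4
  · obtain ⟨a, b, c, d, rfl⟩ := List.length_eq_four.mp hlen
    exact pv_four a b c d
  · have hsum : (PySem.List.sorted (PySem.Dict.counter s).values (fun x : Int => x) true).sum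
        = (s.length : Int) := by
      rw [(PySem.List.sorted_perm _ _ _).sum_eq, pv_values_sum]
    have hne : (s.length : Int) ≠ 4 := by exact_mod_cast hlen
    have hpat : ∀ pat : List Int, pat.sum ≠ (s.length : Int) →
        PySem.List.sorted (PySem.Dict.counter s).values (fun x : Int => x) true ≠ pat := by
      intro pat h hp; exact h (hp ▸ hsum)
    unfold pv_tagA pv_tagB
    rw [if_neg (hpat [4] (by simpa using hne.symm)),
        if_neg (hpat [3, 1] (by simpa using hne.symm)),
        if_neg (hpat [2, 2] (by simpa using hne.symm)),
        if_neg (hpat [2, 1, 1] (by simpa using hne.symm)),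
        if_pos hlen]

-- ===== VERDICT (by name: the statement is the Claim_ definition above) =====
theorem suit_tag_spec : Claim_equal_suit_tag := by
  intro cards _ _
  unfold Spec_suit_tag suit_tag suit_tag_alt
  cases hm : cards.mapM (fun c => (PySem.Str.pyGet? c 1).map PySem.Chars.lowerChar) with
  | none => rfl
  | some s => exact pv_core s
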